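-- pv_equiv track=rewrite | github.com/KarolNie1992/mysite_django_tutorial | viewonsnow/functions.py | viewOnSnow
-- ===== SOURCE A (Python) =====
-- def viewOnSnow(data):
--     dataNew = data.copy()
--
--     for i in range(len(dataNew)):
--         #zakładam że pierwszy i ostatni nie zmienia sie
--         if i == 0 or i == len(dataNew)-1:
--             continue
--         else:
--             maxDic = {
--                 'maxL':dataNew[i],
--                 'maxR':dataNew[i]
--             }
--             endIdx = len(dataNew) - 1
--             #sprawdz najwyższą w lewo
--             for l in range(i + 1):
--                 if dataNew[l] > maxDic['maxL']:
--                     maxDic['maxL'] = dataNew[l]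
--
--             #Sprawdz najwyższą w prawo
--             r = i
--             for _ in range(endIdx-r+1):
--                 if dataNew[r] > maxDic['maxR']:
--                     maxDic['maxR'] = dataNew[r]
--                 r+=1
--
--             #przypisanie do newValue mniejszej wartości ze słownika maxDic
--             newValue = maxDic[min(maxDic, key = maxDic.get)]
--             if dataNew[i] != newValue or dataNew[i] < newValue:
--                 dataNew[i] = newValue
--     return dataNew
-- ===== SOURCE B (Python) =====
-- def viewOnSnow(data):
--     n = len(data)
--     pref = []
--     m = None
--     for x in data:
--         m = x if m is None else max(m, x)
--         pref.append(m)
--     suf = [0] * n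
--     m = None
--     for i in range(n - 1, -1, -1):
--         m = data[i] if m is None else max(m, data[i])
--         suf[i] = m
--     return [min(p, s) for p, s in zip(pref, suf)]
-- ===== Notes on version B (the rewrite author's own statement) =====
-- stated objective: faster
-- what changed: B precomputes prefix-max and suffix-max running arrays in two linear passes and takes elementwise min, instead of A's per-element rescan of the whole prefix and suffix (the in-place updates A makes never change any prefix maximum, so the original-array maxima give the same values).
import Mathlib
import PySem

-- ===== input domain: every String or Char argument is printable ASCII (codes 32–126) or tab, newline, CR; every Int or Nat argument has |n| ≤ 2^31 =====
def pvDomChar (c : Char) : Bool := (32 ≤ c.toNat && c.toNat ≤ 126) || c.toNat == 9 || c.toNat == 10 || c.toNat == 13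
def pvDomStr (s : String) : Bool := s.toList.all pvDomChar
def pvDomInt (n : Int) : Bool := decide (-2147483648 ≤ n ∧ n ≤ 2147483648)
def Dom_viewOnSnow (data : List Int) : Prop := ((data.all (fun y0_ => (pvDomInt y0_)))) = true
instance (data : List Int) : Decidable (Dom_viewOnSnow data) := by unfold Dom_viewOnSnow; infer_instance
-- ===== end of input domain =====

-- B replaces A's per-element O(n) rescans with precomputed prefix-max / suffix-max running maxima (O(n) total).

-- ===== PORT A =====
-- the body of A's outer 'for i in range(len(dataNew))' loop; the two-key dict maxDic
-- (static keys 'maxL','maxR') is modelled by its two values maxL, maxR, and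
-- newValue = maxDic[min(maxDic, key=maxDic.get)] — the value of the first key with the
-- minimal value ('maxL' on ties) — is exactly 'if maxL ≤ maxR then maxL else maxR'.
def pvStepA (dn : List Int) (i : Int) : List Int :=
  if i == 0 || i == (dn.length : Int) - 1 then dn
  else
    let maxL := PySem.List.pyGetD dn i 0
    let maxR := PySem.List.pyGetD dn i 0
    let endIdx : Int := (dn.length : Int) - 1
    -- for l in range(i+1): if dataNew[l] > maxL: maxL = dataNew[l]
    let maxL := (PySem.List.pyRange 0 (i + 1) 1).foldl
      (fun m l => if PySem.List.pyGetD dn l 0 > m then PySem.List.pyGetD dn l 0 else m) maxL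
    -- r = i; for _ in range(endIdx - r + 1): if dataNew[r] > maxR: maxR = dataNew[r]; r += 1
    let p := (PySem.List.pyRange 0 (endIdx - i + 1) 1).foldl
      (fun (p : Int × Int) _ =>
        ((if PySem.List.pyGetD dn p.2 0 > p.1 then PySem.List.pyGetD dn p.2 0 else p.1), p.2 + 1))
      (maxR, i)
    let maxR := p.1
    let newValue := if maxL ≤ maxR then maxL else maxR
    if PySem.List.pyGetD dn i 0 ≠ newValue ∨ PySem.List.pyGetD dn i 0 < newValue then
      PySem.List.pySetD dn i newValue
    else dn

def viewOnSnow (data : List Int) : List Int :=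
  let dataNew := data
  (PySem.List.pyRange 0 (dataNew.length : Int) 1).foldl pvStepA dataNew

-- ===== PORT B =====
-- forward pass of Source B: running maximum so far (None before the first element)
def pvPref : List Int → Option Int → List Int
  | [], _ => []
  | x :: xs, m =>
    let m' := match m with | none => x | some a => max a x
    m' :: pvPref xs (some m')

def viewOnSnow_alt (data : List Int) : List Int :=
  let pref := pvPref data none
  -- Source B's backward pass (filling suf[i] from i = n-1 down) = forward pass on the reversed list
  let suf := (pvPref data.reverse none).reverse
  (pref.zip suf).map (fun p => min p.1 p.2)

-- ===== PRECONDITION & SPEC =====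
def Spec_viewOnSnow (data : List Int) (out : List Int) : Prop := out = viewOnSnow_alt data
instance (data : List Int) (out : List Int) : Decidable (Spec_viewOnSnow data out) := by unfold Spec_viewOnSnow; infer_instance

-- ===== CLAIM (what is proved, stated in full; the proofs are below) =====
def Claim_equal_viewOnSnow : Prop := ∀ (data : List Int), Dom_viewOnSnow data → Spec_viewOnSnow data (viewOnSnow data)

-- ===== LEMMAS AND PROOFS =====

-- maximum of a (nonempty) list
def mx (l : List Int) : Int := l.foldl max (l.headD 0)

theorem mx_cons (x : Int) (xs : List Int) : mx (x :: xs) = xs.foldl max x := by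
  simp [mx]

theorem le_mx {l : List Int} {x : Int} (h : x ∈ l) : x ≤ mx l := by
  cases l with
  | nil => cases h
  | cons a t =>
    rw [mx_cons]
    rcases List.mem_cons.1 h with rfl | ht
    · exact (PySem.List.le_foldl_max t x).1
    · exact (PySem.List.le_foldl_max t a).2 x ht

theorem mx_mem {l : List Int} (h : l ≠ []) : mx l ∈ l := by
  cases l with
  | nil => exact absurd rfl h
  | cons a t =>
    rw [mx_cons]
    rcases PySem.List.foldl_max_mem t a with h1 | h1
    · rw [h1]; exact List.mem_cons_self
    · exact List.mem_cons_of_mem _ h1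

theorem mx_le {l : List Int} {b : Int} (h : l ≠ []) (hb : ∀ x ∈ l, x ≤ b) : mx l ≤ b :=
  hb _ (mx_mem h)

-- prefix max P and suffix max S (on the ORIGINAL data)
def P (data : List Int) (j : Nat) : Int := mx (data.take (j + 1))
def S (data : List Int) (j : Nat) : Int := mx (data.drop j)

theorem getD_le_P (data : List Int) (j : Nat) (hj : j < data.length) :
    data.getD j 0 ≤ P data j := by
  rw [List.getD_eq_getElem data 0 hj]
  exact le_mx (by
    have : (data.take (j+1))[j]'(by simp; omega) = data[j] := by
      simp
    rw [← this]; exact List.getElem_mem _)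

theorem getD_le_S (data : List Int) (j : Nat) (hj : j < data.length) :
    data.getD j 0 ≤ S data j := by
  rw [List.getD_eq_getElem data 0 hj]
  exact le_mx (by
    have : (data.drop j)[0]'(by simp; omega) = data[j] := by simp
    rw [← this]; exact List.getElem_mem _)

theorem P_mono (data : List Int) {j k : Nat} (h : j ≤ k) : P data j ≤ P data k := by
  by_cases hj : j < data.length
  · apply mx_le
    · simp only [ne_eq, List.take_eq_nil_iff]
      push_neg
      constructor
      · omega
      · intro h; rw [h] at hj; simp at hj
    · intro x hx
      exact le_mx (List.take_subset_take_left data (by omega) hx)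
  · unfold P
    rw [List.take_of_length_le (by omega), List.take_of_length_le (by omega)]

-- the loop invariant for A: after the first k iterations the list dn agrees with the
-- final answer at interior indices below k and with data everywhere else
def pvInv (data : List Int) (k : Nat) (dn : List Int) : Prop :=
  dn.length = data.length ∧
  ∀ j, j < data.length →
    dn.getD j 0 = if 0 < j ∧ j + 1 < data.length ∧ j < k
      then min (P data j) (S data j) else data.getD j 0

-- the maxL loop: a counting fold over pyRange 0 c of pyGetD = running max of dn.take c
theorem rangeFold_max (dn : List Int) (c : Nat) (init : Int) (hc : c ≤ dn.length) :
    (PySem.List.pyRange 0 (c : Int) 1).foldl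
      (fun m l => if PySem.List.pyGetD dn l 0 > m then PySem.List.pyGetD dn l 0 else m) init
    = (dn.take c).foldl max init := by
  induction c generalizing init with
  | zero => simp [PySem.List.pyRange]
  | succ c ih =>
    have h1 : ((c : Int) + 1) = ((c + 1 : Nat) : Int) := by push_cast; ring
    have hc' : c < dn.length := by omega
    rw [← h1, PySem.List.pyRange_one_succ_right (by positivity), List.foldl_append,
      ih init (by omega), List.foldl_cons, List.foldl_nil,
      PySem.List.pyGetD_natCast, List.getD_eq_getElem dn 0 hc',
      List.take_add_one, List.getElem?_eq_getElem hc']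
    simp only [Option.toList_some, List.foldl_append, List.foldl_cons, List.foldl_nil]
    rcases le_or_gt (dn[c]) (List.foldl max init (List.take c dn)) with h | h
    · rw [if_neg (by omega), max_eq_left h]
    · rw [if_pos (by omega), max_eq_right (le_of_lt h)]

theorem pairLoop (dn : List Int) (c : Nat) (m r : Int) :
    (PySem.List.pyRange 0 (c : Int) 1).foldl
      (fun (p : Int × Int) _ =>
        ((if PySem.List.pyGetD dn p.2 0 > p.1 then PySem.List.pyGetD dn p.2 0 else p.1), p.2 + 1))
      (m, r)
    = ((PySem.List.pyRange r (r + c) 1).foldl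
        (fun m j => if PySem.List.pyGetD dn j 0 > m then PySem.List.pyGetD dn j 0 else m) m,
       r + c) := by
  induction c generalizing m with
  | zero => simp [PySem.List.pyRange]
  | succ c ih =>
    have h1 : ((c : Int) + 1) = ((c + 1 : Nat) : Int) := by push_cast; ring
    rw [← h1, PySem.List.pyRange_one_succ_right (by positivity), List.foldl_append, ih]
    have h2 : r + ((c : Int) + 1) = (r + c) + 1 := by ring
    rw [h2, PySem.List.pyRange_one_succ_right (by omega), List.foldl_append]
    simp

theorem foldl_ifmax (l : List Int) (init : Int) :
    l.foldl (fun m x => if x > m then x else m) init = l.foldl max init := by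
  induction l generalizing init with
  | nil => rfl
  | cons x xs ih =>
    simp only [List.foldl_cons, ih]
    congr 1
    rcases le_or_gt x init with h | h
    · rw [if_neg (by omega), max_eq_left h]
    · rw [if_pos (by omega), max_eq_right (le_of_lt h)]

theorem step_preserve (data : List Int) (k : Nat) (dn : List Int)
    (hI : pvInv data k dn) (hk : k < data.length) :
    pvInv data (k + 1) (pvStepA dn (k : Int)) := by
  obtain ⟨hlen, hget⟩ := hI
  by_cases hg : ((k : Int) == 0 || (k : Int) == (dn.length : Int) - 1) = true
  · -- boundary index (first or last element): dn is unchanged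
    unfold pvStepA
    rw [if_pos hg]
    refine ⟨hlen, fun j hj => ?_⟩
    rw [hget j hj]
    have hk0 : k = 0 ∨ k + 1 = data.length := by
      rw [hlen] at hg; simp at hg; omega
    have hiff : (0 < j ∧ j + 1 < data.length ∧ j < k) ↔
        (0 < j ∧ j + 1 < data.length ∧ j < k + 1) := by
      rcases hk0 with h0 | h0 <;> constructor <;> intro h <;> exact ⟨h.1, h.2.1, by omega⟩
    by_cases hc : 0 < j ∧ j + 1 < data.length ∧ j < k
    · rw [if_pos hc, if_pos (hiff.mp hc)]
    · rw [if_neg hc, if_neg (fun h => hc (hiff.mpr h))]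
  · -- interior index: 0 < k and k + 1 < n
    have hk0 : 0 < k ∧ k + 1 < data.length := by
      rw [hlen] at hg; simp at hg; omega
    have hdnk : dn.getD k 0 = data.getD k 0 := by
      rw [hget k hk, if_neg (by omega)]
    have fact1 : ∀ j, j ≤ k → data.getD j 0 ≤ dn.getD j 0 ∧ dn.getD j 0 ≤ P data k := by
      intro j hjk
      have hjn : j < data.length := by omega
      by_cases hc : 0 < j ∧ j + 1 < data.length ∧ j < k
      · rw [hget j hjn, if_pos hc]
        exact ⟨le_min (getD_le_P data j hjn) (getD_le_S data j hjn),
          le_trans (min_le_left _ _) (P_mono data hjk)⟩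
      · rw [hget j hjn, if_neg hc]
        exact ⟨le_refl _, le_trans (getD_le_P data j hjn) (P_mono data hjk)⟩
    have hdrop : dn.drop k = data.drop k := by
      apply List.ext_getElem (by simp [hlen])
      intro t h1 h2
      rw [List.getElem_drop, List.getElem_drop]
      have hkt : k + t < data.length := by simp at h2; omega
      have hg2 := hget (k + t) hkt
      rw [if_neg (by omega)] at hg2
      rw [← List.getD_eq_getElem dn 0 (by omega : k + t < dn.length), hg2,
        List.getD_eq_getElem]
    -- value of the maxL loop
    have hML : (dn.take (k + 1)).foldl max (dn.getD k 0) = P data k := by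
      apply le_antisymm
      · rcases PySem.List.foldl_max_mem (dn.take (k + 1)) (dn.getD k 0) with h | h
        · rw [h]; exact (fact1 k (le_refl k)).2
        · obtain ⟨j, hjlt, hjeq⟩ := List.mem_iff_getElem.mp h
          have hjk : j ≤ k := by simp at hjlt; omega
          have hjdn : j < dn.length := by omega
          rw [← hjeq, List.getElem_take, ← List.getD_eq_getElem dn 0 hjdn]
          exact (fact1 j hjk).2
      · have hne : data.take (k + 1) ≠ [] := by
          simp only [ne_eq, List.take_eq_nil_iff]
          push_neg
          exact ⟨by omega, by intro h; rw [h] at hk; simp at hk⟩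
        obtain ⟨j, hjlt, hjeq⟩ := List.mem_iff_getElem.mp (mx_mem hne)
        have hjk : j ≤ k := by simp at hjlt; omega
        have hjn : j < data.length := by omega
        have hmem : dn.getD j 0 ∈ dn.take (k + 1) := by
          rw [List.getD_eq_getElem dn 0 (by omega)]
          rw [show dn[j]'(by omega) = (dn.take (k + 1))[j]'(by simp; omega) from
            (List.getElem_take).symm]
          exact List.getElem_mem _
        calc P data k = (data.take (k + 1))[j] := hjeq.symm
          _ = data.getD j 0 := by rw [List.getElem_take, List.getD_eq_getElem data 0 hjn]
          _ ≤ dn.getD j 0 := (fact1 j hjk).1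
          _ ≤ _ := (PySem.List.le_foldl_max _ _).2 _ hmem
    -- value of the maxR loop
    have hMR : (dn.drop k).foldl max (dn.getD k 0) = S data k := by
      rw [hdrop, hdnk, List.getD_eq_getElem data 0 hk, S,
        List.drop_eq_getElem_cons hk, mx_cons, List.foldl_cons, max_self]
    -- reduce the step to its if-then-else normal form
    have hstep : pvStepA dn (k : Int) =
        if dn.getD k 0 ≠ min (P data k) (S data k) ∨
            dn.getD k 0 < min (P data k) (S data k)
          then dn.set k (min (P data k) (S data k)) else dn := by
      unfold pvStepA
      rw [if_neg hg]
      simp only [PySem.List.pyGetD_natCast]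
      rw [show ((k : Int) + 1) = ((k + 1 : Nat) : Int) from by push_cast; ring]
      rw [rangeFold_max dn (k + 1) _ (by omega)]
      rw [show ((dn.length : Int) - 1 - (k : Int) + 1)
            = ((data.length - k : Nat) : Int) from by rw [hlen]; omega]
      rw [pairLoop dn (data.length - k) _ (k : Int)]
      rw [show ((k : Int) + ((data.length - k : Nat) : Int)) = PySem.List.len dn from by
        simp [PySem.List.len, hlen]; omega]
      rw [PySem.List.foldl_pyRange_pyGetD dn 0
        (fun m x => if x > m then x else m) _ (by positivity)]
      rw [show ((k : Int).toNat) = k from Int.toNat_natCast k]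
      rw [foldl_ifmax, hML, hMR, ← min_def, PySem.List.pySetD_natCast]
    rw [hstep]
    by_cases hcond : dn.getD k 0 ≠ min (P data k) (S data k) ∨
        dn.getD k 0 < min (P data k) (S data k)
    · rw [if_pos hcond]
      refine ⟨by simp [hlen], fun j hj => ?_⟩
      by_cases hjk : j = k
      · subst hjk
        rw [List.getD_eq_getElem _ 0 (by simp; omega), List.getElem_set,
          if_pos rfl, if_pos ⟨by omega, by omega, by omega⟩]
      · rw [List.getD_eq_getElem _ 0 (by simp; omega), List.getElem_set,
          if_neg (fun h => hjk h.symm), ← List.getD_eq_getElem dn 0 (by omega), hget j hj]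
        by_cases hc : 0 < j ∧ j + 1 < data.length ∧ j < k
        · rw [if_pos hc, if_pos ⟨hc.1, hc.2.1, by omega⟩]
        · rw [if_neg hc, if_neg (by intro h; exact hc ⟨h.1, h.2.1, by omega⟩)]
    · rw [if_neg hcond]
      push_neg at hcond
      refine ⟨hlen, fun j hj => ?_⟩
      by_cases hjk : j = k
      · subst hjk
        rw [if_pos ⟨by omega, by omega, by omega⟩]
        exact hcond.1
      · rw [hget j hj]
        by_cases hc : 0 < j ∧ j + 1 < data.length ∧ j < k
        · rw [if_pos hc, if_pos ⟨hc.1, hc.2.1, by omega⟩]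
        · rw [if_neg hc, if_neg (by intro h; exact hc ⟨h.1, h.2.1, by omega⟩)]

theorem fold_inv (data : List Int) (k : Nat) (hk : k ≤ data.length) :
    pvInv data k ((PySem.List.pyRange 0 (k : Int) 1).foldl pvStepA data) := by
  induction k with
  | zero =>
    simp [PySem.List.pyRange]
    exact ⟨rfl, fun j hj => by simp⟩
  | succ k ih =>
    have h1 : ((k : Int) + 1) = ((k + 1 : Nat) : Int) := by push_cast; ring
    rw [← h1, PySem.List.pyRange_one_succ_right (by positivity), List.foldl_append]
    simp only [List.foldl_cons, List.foldl_nil]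
    exact step_preserve data k _ (ih (by omega)) (by omega)

-- B-side characterisation
theorem pvPref_length (data : List Int) (m : Option Int) : (pvPref data m).length = data.length := by
  induction data generalizing m with
  | nil => rfl
  | cons x xs ih => simp [pvPref, ih]

theorem pvPref_get_some (data : List Int) (a : Int) (i : Nat) (h : i < data.length) :
    (pvPref data (some a)).getD i 0 = (data.take (i + 1)).foldl max a := by
  induction data generalizing a i with
  | nil => simp at h
  | cons x xs ih =>
    cases i with
    | zero => simp [pvPref]
    | succ i => simpa [pvPref] using ih (max a x) i (by simpa using h)

theorem pvPref_get (data : List Int) (i : Nat) (h : i < data.length) :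
    (pvPref data none).getD i 0 = P data i := by
  cases data with
  | nil => simp at h
  | cons x xs =>
    cases i with
    | zero => simp [pvPref, P, mx]
    | succ i =>
      have := pvPref_get_some xs x i (by simpa using h)
      simp only [pvPref, List.getD_cons_succ, this]
      rw [P, List.take_succ_cons, mx_cons]

theorem mx_reverse (l : List Int) : mx l.reverse = mx l := by
  cases l with
  | nil => rfl
  | cons x xs =>
    apply le_antisymm
    · exact mx_le (by simp) (fun y hy => le_mx (List.mem_reverse.mp hy))
    · exact mx_le (by simp) (fun y hy => le_mx (List.mem_reverse.mpr hy))

theorem alt_get (data : List Int) (i : Nat) (h : i < data.length) :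
    (viewOnSnow_alt data).getD i 0 = min (P data i) (S data i) := by
  have hlp : (pvPref data none).length = data.length := pvPref_length data none
  have hlr : (pvPref data.reverse none).length = data.length := by
    rw [pvPref_length]; simp
  unfold viewOnSnow_alt
  rw [List.getD_eq_getElem _ 0 (by simp [hlp, hlr]; omega), List.getElem_map,
    List.getElem_zip]
  have h1 : (pvPref data none)[i]'(by omega) = P data i := by
    rw [← List.getD_eq_getElem _ 0 (by omega), pvPref_get data i h]
  have h2 : ((pvPref data.reverse none).reverse)[i]'(by simp [hlr]; omega) = S data i := by
    rw [List.getElem_reverse]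
    rw [← List.getD_eq_getElem _ 0 (by omega),
      show (pvPref data.reverse none).length - 1 - i = data.length - 1 - i from by rw [hlr],
      pvPref_get data.reverse (data.length - 1 - i) (by simp; omega)]
    unfold P S
    rw [show data.length - 1 - i + 1 = data.length - i from by omega,
      List.take_reverse,
      show data.length - (data.length - i) = i from by omega,
      mx_reverse]
  rw [h1, h2]

theorem alt_length (data : List Int) : (viewOnSnow_alt data).length = data.length := by
  simp [viewOnSnow_alt, pvPref_length]

-- ===== VERDICT (by name: the statement is the Claim_ definition above) =====
theorem viewOnSnow_spec : Claim_equal_viewOnSnow := by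
  intro data _
  unfold Spec_viewOnSnow
  have hInv := fold_inv data data.length (le_refl _)
  have hA : viewOnSnow data = (PySem.List.pyRange 0 (data.length : Int) 1).foldl pvStepA data := rfl
  rw [hA]
  obtain ⟨hlen, hget⟩ := hInv
  apply List.ext_getElem (by rw [hlen, alt_length])
  intro j h1 h2
  have hj : j < data.length := by rwa [hlen] at h1
  have := hget j hj
  rw [List.getD_eq_getElem _ 0 h1] at this
  have halt := alt_get data j hj
  rw [List.getD_eq_getElem _ 0 h2] at halt
  rw [this, halt]
  by_cases hcase : 0 < j ∧ j + 1 < data.length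
  · rw [if_pos ⟨hcase.1, hcase.2, hj⟩]
  · rw [if_neg (by tauto), List.getD_eq_getElem data 0 hj]
    rcases Nat.eq_zero_or_pos j with rfl | hpos
    · -- first element: P data 0 = data[0] ≤ S data 0
      have h0 : P data 0 = data[0] := by
        unfold P
        cases data with
        | nil => simp at hj
        | cons x xs => simp [mx]
      have hle : data[0] ≤ S data 0 := by
        have := getD_le_S data 0 hj
        rwa [List.getD_eq_getElem data 0 hj] at this
      rw [h0, min_eq_left hle]
    · -- last element: S data j = data[j] ≤ P data j
      have hlast : j + 1 = data.length := by omega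
      have hS : S data j = data[j] := by
        unfold S
        have hnil : data.drop (j + 1) = [] := List.drop_eq_nil_of_le (by omega)
        rw [List.drop_eq_getElem_cons hj, hnil]
        simp [mx]
      have hle : data[j] ≤ P data j := by
        have := getD_le_P data j hj
        rwa [List.getD_eq_getElem data 0 hj] at this
      rw [hS, min_eq_right hle]
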